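-- pv_equiv track=rewrite | github.com/pypi-data/pypi-mirror-371 | packages/jsonshiatsu/jsonshiatsu-0.2.1-py3-none-any.whl/jsonshiatsu/core/transformer.py | fix_unclosed_strings
-- ===== SOURCE A (Python) =====
-- def fix_unclosed_strings(text: str) -> str:
--     """
--     Fix unclosed strings by adding closing quotes.
--
--     Handles cases where strings are not properly terminated.
--
--     Improved to handle multiline strings and escaped quotes correctly.
--     """
--
--     # Don't process if text looks like it already has well-formed strings
--     # Count total quotes in entire text to see if they're balanced
--     # Use proper escape sequence counting
--     def count_unescaped_quotes(text: str) -> int: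
--         quote_count = 0
--         i = 0
--         while i < len(text):
--             if text[i] == '"':
--                 # Count preceding backslashes
--                 backslash_count = 0
--                 j = i - 1
--                 while j >= 0 and text[j] == "\\":
--                     backslash_count += 1
--                     j -= 1
--                 # Quote is escaped if odd number of preceding backslashes
--                 if backslash_count % 2 == 0:
--                     quote_count += 1
--             i += 1
--         return quote_count
--
--     total_quotes = count_unescaped_quotes(text)
--
--     # If quotes are already balanced, don't mess with it
--     if total_quotes % 2 == 0:
--         return text
--
--     lines = text.split("\n")
--     fixed_lines = []
--
--     for line in lines:
--         # Count unescaped quotes in this line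
--         quote_count = count_unescaped_quotes(line)
--
--         # If odd number of quotes, add closing quote at end
--         if quote_count % 2 == 1:
--             # Find the last comma or end of line and add quote before it
--             if line.rstrip().endswith(","):
--                 line = line.rstrip()[:-1] + '",'
--             else:
--                 line = line.rstrip() + '"'
--
--         fixed_lines.append(line)
--
--     return "\n".join(fixed_lines)
-- ===== SOURCE B (Python) =====
-- def fix_unclosed_strings(text: str) -> str:
--     # Single forward pass with an escape flag instead of a backward
--     # backslash re-scan at every quote.
--     def quote_count(s: str) -> int:
--         cnt = 0
--         esc = False
--         for ch in s:
--             if ch == '\\':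
--                 esc = not esc
--             else:
--                 if ch == '"' and not esc:
--                     cnt += 1
--                 esc = False
--         return cnt
--
--     if quote_count(text) % 2 == 0:
--         return text
--
--     def close(line: str) -> str:
--         if quote_count(line) % 2 == 0:
--             return line
--         stripped = line.rstrip()
--         if stripped.endswith(","):
--             return stripped[:-1] + '",'
--         return stripped + '"'
--
--     return "\n".join(close(line) for line in text.split("\n"))
-- ===== Notes on version B (the rewrite author's own statement) =====
-- stated objective: faster
-- what changed: Replaced the backward backslash re-scan performed at every quote (quadratic on backslash runs) by a single forward pass carrying an escape flag.
import Mathlib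
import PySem

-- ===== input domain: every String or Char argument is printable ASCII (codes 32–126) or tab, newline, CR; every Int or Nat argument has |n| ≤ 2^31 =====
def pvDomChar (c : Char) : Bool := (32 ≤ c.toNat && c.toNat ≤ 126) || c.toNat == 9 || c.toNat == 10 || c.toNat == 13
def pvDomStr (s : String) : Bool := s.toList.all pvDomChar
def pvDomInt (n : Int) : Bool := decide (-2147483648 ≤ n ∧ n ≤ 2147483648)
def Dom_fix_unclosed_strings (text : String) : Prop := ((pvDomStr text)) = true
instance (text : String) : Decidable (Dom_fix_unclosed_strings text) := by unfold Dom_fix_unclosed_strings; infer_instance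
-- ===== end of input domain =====

-- B replaces A's per-quote backward backslash re-scan by a single forward escape-state pass.

-- ===== PORT A =====

-- inner while loop: count backslashes immediately preceding index j+1, scanning down
def pvBsA (s : List Char) (j : Int) : Nat :=
  if 0 ≤ j ∧ PySem.List.pyGet? s j = some '\\' then pvBsA s (j - 1) + 1 else 0
termination_by (j + 1).toNat
decreasing_by omega

-- outer while loop of count_unescaped_quotes (i counts up)
def pvCountA (s : List Char) (i : Nat) : Nat :=
  if h : i < s.length then
    (if s[i] = '"' then (if pvBsA s ((i : Int) - 1) % 2 = 0 then 1 else 0) else 0)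
      + pvCountA s (i + 1)
  else 0
termination_by s.length - i

-- body of A's for-loop over lines
def pvFixLineA (line : List Char) : List Char :=
  if pvCountA line 0 % 2 = 1 then
    if PySem.Chars.endswith (PySem.Chars.rstrip line) [','] then
      PySem.Chars.slice (PySem.Chars.rstrip line) none (some (-1)) ++ ['"', ',']
    else
      PySem.Chars.rstrip line ++ ['"']
  else line

def fix_unclosed_strings (text : String) : String :=
  let cs := text.toList
  if pvCountA cs 0 % 2 = 0 then text
  else
    let lines := PySem.Chars.splitOn cs ['\n']
    let fixed := lines.foldl (fun acc l => acc ++ [pvFixLineA l]) []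
    String.ofList (PySem.Chars.join ['\n'] fixed)

-- ===== PORT B =====

-- B's single forward pass: (count, escape-flag) over the characters
def pvScanB (s : List Char) : Nat × Bool :=
  s.foldl
    (fun st c =>
      if c = '\\' then (st.1, !st.2)
      else if c = '"' ∧ st.2 = false then (st.1 + 1, false)
      else (st.1, false))
    (0, false)

def pvCloseB (line : List Char) : List Char :=
  if (pvScanB line).1 % 2 = 0 then line
  else
    let stripped := PySem.Chars.rstrip line
    if PySem.Chars.endswith stripped [','] then
      PySem.Chars.slice stripped none (some (-1)) ++ ['"', ',']
    else stripped ++ ['"']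

def fix_unclosed_strings_alt (text : String) : String :=
  let cs := text.toList
  if (pvScanB cs).1 % 2 = 0 then text
  else String.ofList (PySem.Chars.join ['\n'] ((PySem.Chars.splitOn cs ['\n']).map pvCloseB))

-- ===== PRECONDITION & SPEC =====
def Spec_fix_unclosed_strings (text : String) (out : String) : Prop := out = fix_unclosed_strings_alt text
instance (text : String) (out : String) : Decidable (Spec_fix_unclosed_strings text out) := by unfold Spec_fix_unclosed_strings; infer_instance

-- ===== CLAIM (what is proved, stated in full; the proofs are below) =====
def Claim_equal_fix_unclosed_strings : Prop := ∀ (text : String), Dom_fix_unclosed_strings text → Spec_fix_unclosed_strings text (fix_unclosed_strings text)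

-- ===== LEMMAS AND PROOFS =====

-- appending characters does not change a backslash back-scan that starts inside s
theorem pvBsA_append (s t : List Char) : ∀ (n : Nat) (j : Int), (j + 1).toNat ≤ n → j < s.length →
    pvBsA (s ++ t) j = pvBsA s j := by
  intro n
  induction n with
  | zero =>
    intro j hj _
    have h0 : ¬ 0 ≤ j := by omega
    rw [pvBsA]
    conv_rhs => rw [pvBsA]
    simp [h0]
  | succ n ih =>
    intro j hj hlt
    rw [pvBsA]
    conv_rhs => rw [pvBsA]
    by_cases h0 : 0 ≤ j
    · have hget : PySem.List.pyGet? (s ++ t) j = PySem.List.pyGet? s j := by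
        rw [PySem.List.pyGet?_of_nonneg _ h0, PySem.List.pyGet?_of_nonneg _ h0,
          List.getElem?_append_left (by omega)]
      rw [hget]
      by_cases hb : PySem.List.pyGet? s j = some '\\'
      · simp only [h0, hb, and_self, if_true]
        rw [ih (j - 1) (by omega) (by omega)]
      · simp [hb]
    · simp [h0]

-- one more character on the right adds at most one counted quote, decided by the trailing back-scan
theorem pvCountA_append (s : List Char) (c : Char) : ∀ (k : Nat),
    pvCountA (s ++ [c]) (s.length - k)
      = pvCountA s (s.length - k)
        + (if c = '"' then (if pvBsA s ((s.length : Int) - 1) % 2 = 0 then 1 else 0) else 0) := by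
  intro k
  induction k with
  | zero =>
    simp only [Nat.sub_zero]
    rw [pvCountA]
    conv_rhs => rw [pvCountA]
    have h1 : s.length < (s ++ [c]).length := by simp
    have h2 : ¬ s.length < s.length := by omega
    simp only [h1, dif_pos, h2]
    rw [pvCountA]
    have h3 : ¬ s.length + 1 < (s ++ [c]).length := by simp
    simp only [h3]
    have hc : (s ++ [c])[s.length]'(h1) = c := by simp
    rw [hc]
    have hb : pvBsA (s ++ [c]) ((s.length : Int) - 1) = pvBsA s ((s.length : Int) - 1) :=
      pvBsA_append s [c] ((((s.length : Int) - 1) + 1).toNat) _ (le_refl _) (by omega)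
    rw [hb]
    simp
  | succ k ih =>
    by_cases hk : s.length ≤ k
    · have : s.length - (k + 1) = s.length - k := by omega
      rw [this]; exact ih
    · have hi : s.length - (k + 1) < s.length := by omega
      have hi' : s.length - (k + 1) < (s ++ [c]).length := by simp
      rw [pvCountA]
      conv_rhs => rw [pvCountA]
      simp only [hi, dif_pos, hi', dif_pos]
      have hc : (s ++ [c])[s.length - (k + 1)]'(hi') = s[s.length - (k + 1)]'(hi) :=
        List.getElem_append_left hi
      rw [hc]
      have hb : pvBsA (s ++ [c]) (((s.length - (k + 1) : Nat) : Int) - 1)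
          = pvBsA s (((s.length - (k + 1) : Nat) : Int) - 1) :=
        pvBsA_append s [c] ((((s.length - (k + 1) : Nat) : Int) - 1 + 1).toNat) _
          (le_refl _) (by omega)
      rw [hb]
      have hnext : s.length - (k + 1) + 1 = s.length - k := by omega
      rw [hnext, ih, Nat.add_assoc]

-- the back-scan ending at the appended character
theorem pvBsA_concat (s : List Char) (c : Char) :
    pvBsA (s ++ [c]) (s.length : Int) = if c = '\\' then pvBsA s ((s.length : Int) - 1) + 1 else 0 := by
  rw [pvBsA]
  have hget : PySem.List.pyGet? (s ++ [c]) (s.length : Int) = some c := by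
    rw [PySem.List.pyGet?_of_nonneg _ (by omega)]
    simp
  rw [hget]
  by_cases hc : c = '\\'
  · have hb : pvBsA (s ++ [c]) ((s.length : Int) - 1) = pvBsA s ((s.length : Int) - 1) :=
      pvBsA_append s [c] ((((s.length : Int) - 1) + 1).toNat) _ (le_refl _) (by omega)
    subst hc
    simp [hb]
  · simp [hc]

theorem pvCountA_zero_append (s : List Char) (c : Char) :
    pvCountA (s ++ [c]) 0
      = pvCountA s 0
        + (if c = '"' then (if pvBsA s ((s.length : Int) - 1) % 2 = 0 then 1 else 0) else 0) := by
  have h := pvCountA_append s c s.length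
  rwa [Nat.sub_self] at h

-- the forward scan computes A's count, and its flag is the parity of the trailing back-scan
theorem pvScanB_eq (s : List Char) :
    pvScanB s = (pvCountA s 0, decide (pvBsA s ((s.length : Int) - 1) % 2 = 1)) := by
  induction s using List.reverseRecOn with
  | nil =>
    rw [pvScanB, pvCountA, pvBsA]
    simp
    rw [pvBsA]
    simp
  | append_singleton s c ih =>
    rw [pvScanB, List.foldl_append, ← pvScanB, ih]
    simp only [List.foldl_cons, List.foldl_nil]
    have hlen : (((s ++ [c]).length : Int)) - 1 = (s.length : Int) := by simp
    rw [hlen, pvBsA_concat, pvCountA_zero_append]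
    by_cases hbsl : c = '\\'
    · have hq : c ≠ '"' := by rw [hbsl]; decide
      simp only [hbsl, if_true, Prod.mk.injEq]
      refine ⟨rfl, ?_⟩
      by_cases hp : pvBsA s ((s.length : Int) - 1) % 2 = 1
      · simp [hp]; omega
      · simp [hp]; omega
    · by_cases hq : c = '"'
      · simp only [hq, if_true]
        by_cases hp : pvBsA s ((s.length : Int) - 1) % 2 = 1
        · have h0 : ¬ pvBsA s ((s.length : Int) - 1) % 2 = 0 := by omega
          simp [hp]
        · have h0 : pvBsA s ((s.length : Int) - 1) % 2 = 0 := by omega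
          simp [h0]
      · simp [hbsl, hq]

theorem pvCount_eq (s : List Char) : (pvScanB s).1 = pvCountA s 0 := by
  rw [pvScanB_eq]

theorem pvCloseB_eq (line : List Char) : pvCloseB line = pvFixLineA line := by
  unfold pvCloseB pvFixLineA
  rw [pvCount_eq]
  by_cases hp : pvCountA line 0 % 2 = 1
  · have h0 : ¬ pvCountA line 0 % 2 = 0 := by omega
    simp [hp]
  · have h0 : pvCountA line 0 % 2 = 0 := by omega
    simp [h0]

-- ===== VERDICT (by name: the statement is the Claim_ definition above) =====
theorem fix_unclosed_strings_spec : Claim_equal_fix_unclosed_strings := by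
  intro text _
  unfold Spec_fix_unclosed_strings fix_unclosed_strings fix_unclosed_strings_alt
  simp only [pvCount_eq, PySem.List.foldl_append_singleton_eq_map, List.nil_append]
  split_ifs with h
  · rfl
  · simp only [show pvCloseB = pvFixLineA from funext pvCloseB_eq]
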